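-- pv_equiv track=rewrite | github.com/masa-aa/library_atcoder | generator/多重ループ.py | multiple_loops
-- ===== SOURCE A (Python) =====
-- def multiple_loops(loops: list):
--     """
--     各 k 対して, loops[k] 回ループする. itertools.productに似ている.
--     """
--     n = len(loops)
--     d = [0] * n
--     loop_count = 1
--     for i in loops:
--         loop_count *= i
--     if 0 in loops:
--         return
--     yield tuple(d)
--     for _ in range(loop_count - 1):
--         d[0] += 1
--         i = 0
--         while i < n and d[i] == loops[i]:
--             d[i] = 0
--             i += 1
--             d[i] += 1
--         yield tuple(d)
-- ===== SOURCE B (Python) =====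
-- def multiple_loops(loops: list):
--     total = 1
--     for r in loops:
--         total *= r
--     for m in range(total):
--         d = []
--         for r in loops:
--             d.append(m % r)
--             m //= r
--         yield tuple(d)
-- ===== Notes on version B (the rewrite author's own statement) =====
-- stated objective: alternative
-- what changed: replaces A's mutable odometer array with per-step carry propagation by directly decoding each index m in range(prod(loops)) into its mixed-radix digits (m % r, m //= r in forward order); Pre_ excludes only lists with a negative bound and no zero, outside the natural domain of loop counts, where A's never-carrying odometer returns accidental tuples
-- outside the precondition, e.g. on multiple_loops([-2]): A returns [(0,)], B returns []
import Mathlib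
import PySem

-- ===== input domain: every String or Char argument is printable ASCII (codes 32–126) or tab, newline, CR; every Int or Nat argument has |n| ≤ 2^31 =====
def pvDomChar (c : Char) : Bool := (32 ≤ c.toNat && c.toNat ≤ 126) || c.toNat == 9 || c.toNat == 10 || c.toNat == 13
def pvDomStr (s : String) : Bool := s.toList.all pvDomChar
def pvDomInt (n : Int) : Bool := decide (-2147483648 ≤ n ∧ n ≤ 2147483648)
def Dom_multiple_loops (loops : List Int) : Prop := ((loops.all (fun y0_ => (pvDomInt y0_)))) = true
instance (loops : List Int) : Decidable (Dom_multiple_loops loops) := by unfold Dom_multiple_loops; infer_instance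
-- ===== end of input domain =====

-- B replaces A's mutable odometer array with carry propagation by a direct mixed-radix
-- decode of each index m (m % r, m //= r per radix); alternative decomposition, similar cost.

-- ===== PORT A =====
-- d[i] / loops[i]: in A every access is in range on reachable states; getD 0 is a totality guard only
def pvGetD (xs : List Int) (i : Nat) : Int := xs.getD i 0

-- the inner `while i < n and d[i] == loops[i]` loop; fuel ≥ n+1 - i makes it total (i grows each turn)
def pvCarry (loops : List Int) (d : List Int) (i : Nat) : Nat → List Int
  | 0 => d
  | fuel + 1 =>
    if i < loops.length ∧ pvGetD d i = pvGetD loops i then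
      let d1 := d.set i 0
      let d2 := d1.set (i + 1) (pvGetD d1 (i + 1) + 1)
      pvCarry loops d2 (i + 1) fuel
    else d

def multiple_loops (loops : List Int) : List (List Int) :=
  let n := loops.length
  let d := List.replicate n (0 : Int)
  let loop_count := loops.foldl (· * ·) 1
  if (0 : Int) ∈ loops then []
  else
    ((List.range (loop_count - 1).toNat).foldl
      (fun (st : List Int × List (List Int)) _ =>
        let d1 := st.1.set 0 (pvGetD st.1 0 + 1)
        let d2 := pvCarry loops d1 0 (n + 1)
        (d2, st.2 ++ [d2]))
      (d, [d])).2

-- ===== PORT B =====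
-- the inner `for r in loops: d.append(m % r); m //= r` loop
def pvDecode (loops : List Int) (m : Int) : List Int :=
  match loops with
  | [] => []
  | r :: rs => PySem.Int.mod m r :: pvDecode rs (PySem.Int.floordiv m r)

def multiple_loops_alt (loops : List Int) : List (List Int) :=
  let total := loops.foldl (· * ·) 1
  (List.range total.toNat).map (fun m : Nat => pvDecode loops (m : Int))

-- ===== PRECONDITION & SPEC =====
-- Pre_ excludes only lists with a negative bound and no zero (outside the natural domain of
-- loop counts): there A still returns, but its value is an accident of an odometer whose carry
-- condition d[i] == loops[i] can never fire; lists containing 0 stay inside (both return []).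
def Pre_multiple_loops (loops : List Int) : Prop := (0 : Int) ∈ loops ∨ ∀ r ∈ loops, 0 ≤ r
instance (loops : List Int) : Decidable (Pre_multiple_loops loops) := by unfold Pre_multiple_loops; infer_instance
def pvWitness_multiple_loops : List Int := [2, 3]

def Spec_multiple_loops (loops : List Int) (out : List (List Int)) : Prop := out = multiple_loops_alt loops
instance (loops : List Int) (out : List (List Int)) : Decidable (Spec_multiple_loops loops out) := by unfold Spec_multiple_loops; infer_instance

-- ===== CLAIM (what is proved, stated in full; the proofs are below) =====
def Claim_equal_multiple_loops : Prop := ∀ (loops : List Int), Dom_multiple_loops loops → Pre_multiple_loops loops → Spec_multiple_loops loops (multiple_loops loops)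

-- ===== LEMMAS AND PROOFS =====

-- structural version of the carry loop, used only in the proofs
def pvIncHead : List Int → List Int
  | [] => []
  | x :: xs => (x + 1) :: xs

def pvCarryS : List Int → List Int → List Int
  | [], d => d
  | _ :: _, [] => []
  | r :: rs, x :: xs => if x = r then 0 :: pvCarryS rs (pvIncHead xs) else x :: xs

lemma pvCarry_bridge (loops : List Int) : ∀ (fuel i : Nat) (d : List Int),
    d.length = loops.length → loops.length - i < fuel →
    pvCarry loops d i fuel = d.take i ++ pvCarryS (loops.drop i) (d.drop i) := by
  intro fuel
  induction fuel with
  | zero => intro i d _ h; omega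
  | succ fuel ih =>
    intro i d hlen hfuel
    by_cases h : i < loops.length ∧ pvGetD d i = pvGetD loops i
    · rw [pvCarry, if_pos h]
      obtain ⟨hi, heq⟩ := h
      have hid : i < d.length := by omega
      have hget_d : pvGetD d i = d[i] := List.getD_eq_getElem (l := d) (d := 0) hid
      have hget_l : pvGetD loops i = loops[i] := List.getD_eq_getElem (l := loops) (d := 0) hi
      set d1 := d.set i 0 with hd1
      set d2 := d1.set (i + 1) (pvGetD d1 (i + 1) + 1) with hd2
      have hlen1 : d1.length = loops.length := by simp [hd1, hlen]
      have hlen2 : d2.length = loops.length := by simp [hd2, hlen1]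
      rw [ih (i+1) d2 hlen2 (by omega)]
      rw [List.drop_eq_getElem_cons hi, List.drop_eq_getElem_cons hid, pvCarryS]
      rw [if_pos (by rw [← hget_d, ← hget_l, heq])]
      have hlt : i < d1.length := by omega
      have htake : d2.take (i+1) = d.take i ++ [0] := by
        rw [hd2, List.take_set, List.set_eq_of_length_le (by simp)]
        rw [hd1, List.take_set, List.take_add_one, List.getElem?_eq_getElem hid]
        rw [List.set_append]
        have hmin : min i d.length = i := Nat.min_eq_left hid.le
        simp [List.length_take, hmin]
      have hdrop : d2.drop (i+1) = pvIncHead (d.drop (i+1)) := by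
        rw [hd2, List.drop_set]
        rw [if_neg (lt_irrefl (i+1))]
        simp only [Nat.sub_self]
        have hd1drop : d1.drop (i+1) = d.drop (i+1) := by
          rw [hd1, List.drop_set, if_pos (by omega)]
        rw [hd1drop]
        by_cases hi1 : i + 1 < d.length
        · rw [List.drop_eq_getElem_cons hi1, pvIncHead]
          have hv : pvGetD d1 (i+1) = d[i+1] := by
            simp only [pvGetD]
            rw [List.getD_eq_getElem (l := d1) (d := 0) (by omega)]
            simp only [hd1, List.getElem_set]
            rw [if_neg (by omega)]
          rw [hv, List.set_cons_zero]
        · rw [List.drop_eq_nil_of_le (by omega)]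
          simp [pvIncHead]
      rw [htake, hdrop, List.append_assoc]
      simp
    · rw [pvCarry, if_neg h]
      by_cases hi : i < loops.length
      · have hid : i < d.length := by omega
        have : pvCarryS (loops.drop i) (d.drop i) = d.drop i := by
          rw [List.drop_eq_getElem_cons hi, List.drop_eq_getElem_cons hid, pvCarryS,
            if_neg (fun hc => h ⟨hi, by
              simp only [pvGetD]
              rw [List.getD_eq_getElem (l := d) (d := 0) hid,
                List.getD_eq_getElem (l := loops) (d := 0) hi, hc]⟩)]
        rw [this, List.take_append_drop]
      · rw [List.drop_eq_nil_of_le (le_of_not_gt hi), pvCarryS, List.take_append_drop]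

lemma pvDecode_zero (loops : List Int) (hpos : ∀ r ∈ loops, 0 < r) :
    pvDecode loops 0 = List.replicate loops.length 0 := by
  induction loops with
  | nil => rfl
  | cons r rs ih =>
    have hr : 0 < r := hpos r List.mem_cons_self
    have ih' := ih (fun x hx => hpos x (List.mem_cons_of_mem r hx))
    simp only [pvDecode, PySem.Int.mod_eq_emod_of_pos hr,
      PySem.Int.floordiv_eq_ediv_of_pos hr, Int.zero_emod, Int.zero_ediv,
      List.length_cons, List.replicate_succ, ih']

lemma pvFoldl_mul_acc : ∀ (l : List Int) (a : Int), l.foldl (· * ·) a = a * l.foldl (· * ·) 1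
  | [], a => (mul_one a).symm
  | r :: rs, a => by
    simp only [List.foldl_cons]
    rw [pvFoldl_mul_acc rs (a * r), pvFoldl_mul_acc rs (1 * r)]
    ring

lemma pvFoldl_mul_zero (loops : List Int) (h : (0 : Int) ∈ loops) :
    loops.foldl (· * ·) 1 = 0 := by
  induction loops with
  | nil => simp at h
  | cons r rs ih =>
    rcases List.mem_cons.mp h with h0 | h0
    · rw [List.foldl_cons, pvFoldl_mul_acc, ← h0]; ring
    · rw [List.foldl_cons, pvFoldl_mul_acc, ih h0]; ring

lemma pvFoldl_mul_pos (loops : List Int) (hpos : ∀ r ∈ loops, 0 < r) :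
    0 < loops.foldl (· * ·) 1 := by
  induction loops with
  | nil => norm_num
  | cons r rs ih =>
    have hr : 0 < r := hpos r List.mem_cons_self
    have ih' := ih (fun x hx => hpos x (List.mem_cons_of_mem r hx))
    rw [List.foldl_cons, pvFoldl_mul_acc]
    positivity

-- the heart of the equivalence: one odometer increment is mixed-radix +1
lemma pvStep_decode (loops : List Int) (hpos : ∀ r ∈ loops, 0 < r) : ∀ (m : Int), 0 ≤ m →
    m + 1 < loops.foldl (· * ·) 1 →
    pvCarryS loops (pvIncHead (pvDecode loops m)) = pvDecode loops (m + 1) := by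
  induction loops with
  | nil => intro m hm hlt; simp at hlt; omega
  | cons r rs ih =>
    intro m hm hlt
    have hr : 0 < r := hpos r List.mem_cons_self
    have hpos' : ∀ x ∈ rs, 0 < x := fun x hx => hpos x (List.mem_cons_of_mem r hx)
    have hT : m + 1 < (1 * r) * (rs.foldl (· * ·) 1) := by
      have h1 := pvFoldl_mul_acc rs (1 * r)
      simp only [List.foldl_cons] at hlt
      omega
    simp only [pvDecode, PySem.Int.mod_eq_emod_of_pos hr,
      PySem.Int.floordiv_eq_ediv_of_pos hr, pvIncHead, pvCarryS]
    have hme := Int.mul_ediv_add_emod m r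
    have hs0 : 0 ≤ m % r := Int.emod_nonneg m (by omega)
    have hsr : m % r < r := Int.emod_lt_of_pos m hr
    by_cases heq : m % r + 1 = r
    · rw [if_pos heq]
      have hdiv : (m + 1) / r = m / r + 1 ∧ (m + 1) % r = 0 :=
        (Int.ediv_emod_unique hr).mpr ⟨by linear_combination hme - heq, le_refl 0, hr⟩
      rw [hdiv.1, hdiv.2]
      have hq0 : 0 ≤ m / r := Int.ediv_nonneg hm hr.le
      have hqlt : m / r + 1 < rs.foldl (· * ·) 1 := by
        have hmul : r * (m / r + 1) = m + 1 := by linear_combination hme - heq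
        nlinarith
      rw [show (match pvDecode rs (m / r) with | [] => ([] : List Int) | x :: xs => (x + 1) :: xs)
            = pvIncHead (pvDecode rs (m / r)) from rfl]
      rw [ih hpos' (m / r) hq0 hqlt]
    · rw [if_neg heq]
      have hdiv : (m + 1) / r = m / r ∧ (m + 1) % r = m % r + 1 :=
        (Int.ediv_emod_unique hr).mpr ⟨by linear_combination hme, by omega, by omega⟩
      rw [hdiv.1, hdiv.2]

-- the step of A's outer loop, named for the invariant lemma
def pvStepA (loops : List Int) (st : List Int × List (List Int)) : List Int × List (List Int) :=
  let d1 := st.1.set 0 (pvGetD st.1 0 + 1)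
  let d2 := pvCarry loops d1 0 (loops.length + 1)
  (d2, st.2 ++ [d2])

lemma pvDecode_length (loops : List Int) (m : Int) : (pvDecode loops m).length = loops.length := by
  induction loops generalizing m with
  | nil => rfl
  | cons r rs ih => simp [pvDecode, ih]

lemma pvStepA_decode (loops : List Int) (hpos : ∀ r ∈ loops, 0 < r) (m : Int) (hm : 0 ≤ m)
    (hlt : m + 1 < loops.foldl (· * ·) 1) (acc : List (List Int)) :
    pvStepA loops (pvDecode loops m, acc) = (pvDecode loops (m + 1), acc ++ [pvDecode loops (m + 1)]) := by
  have hne : loops ≠ [] := by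
    intro h; subst h; simp at hlt; omega
  obtain ⟨r, rs, rfl⟩ := List.exists_cons_of_ne_nil hne
  have hinc : (pvDecode (r :: rs) m).set 0 (pvGetD (pvDecode (r :: rs) m) 0 + 1)
      = pvIncHead (pvDecode (r :: rs) m) := by
    simp [pvDecode, pvIncHead, pvGetD]
  have hcb := pvCarry_bridge (r :: rs) ((r :: rs).length + 1) 0
      (pvIncHead (pvDecode (r :: rs) m))
      (by simp [pvIncHead, pvDecode, pvDecode_length]) (by omega)
  simp only [pvStepA, hinc, hcb, List.take_zero, List.drop_zero, List.nil_append]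
  rw [pvStep_decode (r :: rs) hpos m hm hlt]

lemma pvFoldl_inv (loops : List Int) (hpos : ∀ r ∈ loops, 0 < r) : ∀ (k : Nat),
    k ≤ (loops.foldl (· * ·) 1 - 1).toNat →
    (List.range k).foldl (fun st _ => pvStepA loops st)
        (List.replicate loops.length 0, [List.replicate loops.length 0])
      = (pvDecode loops (k : Int),
         (List.range (k + 1)).map (fun m : Nat => pvDecode loops (m : Int))) := by
  intro k
  induction k with
  | zero =>
    intro _
    simp [pvDecode_zero loops hpos]
  | succ k ih =>
    intro hk
    have hk' : ((k : Int) + 1) < loops.foldl (· * ·) 1 := by omega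
    rw [List.range_succ, List.foldl_append, ih (by omega), List.foldl_cons, List.foldl_nil]
    have hstep := pvStepA_decode loops hpos (k : Int) (by positivity) hk'
      ((List.range (k + 1)).map (fun m : Nat => pvDecode loops (m : Int)))
    rw [hstep, List.range_succ (n := k + 1), List.map_append]
    push_cast
    simp

-- ===== VERDICT (by name: the statement is the Claim_ definition above) =====
theorem multiple_loops_spec : Claim_equal_multiple_loops := by
  intro loops _ hpre
  show multiple_loops loops = multiple_loops_alt loops
  by_cases h0 : (0 : Int) ∈ loops
  · simp [multiple_loops, multiple_loops_alt, h0, pvFoldl_mul_zero loops h0]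
  · have hnn : ∀ r ∈ loops, 0 ≤ r := hpre.resolve_left h0
    have hpos : ∀ r ∈ loops, 0 < r := fun r hr =>
      lt_of_le_of_ne (hnn r hr) (fun h => h0 (h ▸ hr))
    set T := loops.foldl (· * ·) 1 with hTdef
    have hTpos : 0 < T := pvFoldl_mul_pos loops hpos
    have hinv := pvFoldl_inv loops hpos (T - 1).toNat le_rfl
    simp only [multiple_loops, multiple_loops_alt, if_neg h0, ← hTdef]
    show (((List.range (T - 1).toNat).foldl (fun st _ => pvStepA loops st)
      (List.replicate loops.length 0, [List.replicate loops.length 0])).2) = _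
    rw [hinv]
    have : (T - 1).toNat + 1 = T.toNat := by omega
    rw [this]
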